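-- pv_equiv track=rewrite | github.com/HedyHu/WebCrawling | Step0_LIWCcalculation.py | augment_word_to_cats
-- ===== SOURCE A (Python) =====
-- from collections import defaultdict
--
-- def build_child_to_ancestors(parent_to_children: dict[str, list[str]]) -> dict[str, set[str]]:
--     child_to_ancestors = defaultdict(set)
--
--     for parent, children in parent_to_children.items():
--         for child in children:
--             child_to_ancestors[child].add(parent)
--
--     changed = True
--     while changed:
--         changed = False
--         for child, ancestors in list(child_to_ancestors.items()):
--             expanded = set(ancestors)
--             for anc in list(ancestors):
--                 expanded |= child_to_ancestors.get(anc, set())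
--             if expanded != ancestors:
--                 child_to_ancestors[child] = expanded
--                 changed = True
--
--     return dict(child_to_ancestors)
--
-- def augment_word_to_cats(word_to_cats: dict[str, set[str]], parent_to_children: dict[str, list[str]]) -> dict[str, set[str]]:
--     child_to_ancestors = build_child_to_ancestors(parent_to_children)
--     augmented = {}
--     for word, cats in word_to_cats.items():
--         expanded = set(cats)
--         for cat in list(cats):
--             expanded |= child_to_ancestors.get(cat, set())
--         augmented[word] = expanded
--     return augmented
-- ===== SOURCE B (Python) =====
-- def augment_word_to_cats(word_to_cats: dict[str, set[str]], parent_to_children: dict[str, list[str]]) -> dict[str, set[str]]: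
--     # Invert the hierarchy into a child -> direct-parents map.
--     parents = {}
--     for parent, children in parent_to_children.items():
--         for child in children:
--             parents.setdefault(child, set()).add(parent)
--     # For each child node, one explicit-stack graph traversal collects every
--     # reachable ancestor exactly once (cycle-safe: 'seen' doubles as visited set).
--     ancestors = {}
--     for node, direct in parents.items():
--         seen = set()
--         stack = list(direct)
--         while stack:
--             p = stack.pop()
--             if p not in seen:
--                 seen.add(p)
--                 stack.extend(parents.get(p, ()))
--         ancestors[node] = seen
--     # Augment each word's categories with the precomputed ancestor sets.
--     return {word: set(cats).union(*(ancestors.get(cat, set()) for cat in cats))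
--             for word, cats in word_to_cats.items()}
-- ===== Notes on version B (the rewrite author's own statement) =====
-- stated objective: alternative
-- what changed: A's repeated global fixed-point sweeps (re-unioning every node's ancestor set until nothing changes) are replaced by one explicit-stack graph traversal per node that collects that node's reachable ancestors exactly once with a visited set.
import Mathlib
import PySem

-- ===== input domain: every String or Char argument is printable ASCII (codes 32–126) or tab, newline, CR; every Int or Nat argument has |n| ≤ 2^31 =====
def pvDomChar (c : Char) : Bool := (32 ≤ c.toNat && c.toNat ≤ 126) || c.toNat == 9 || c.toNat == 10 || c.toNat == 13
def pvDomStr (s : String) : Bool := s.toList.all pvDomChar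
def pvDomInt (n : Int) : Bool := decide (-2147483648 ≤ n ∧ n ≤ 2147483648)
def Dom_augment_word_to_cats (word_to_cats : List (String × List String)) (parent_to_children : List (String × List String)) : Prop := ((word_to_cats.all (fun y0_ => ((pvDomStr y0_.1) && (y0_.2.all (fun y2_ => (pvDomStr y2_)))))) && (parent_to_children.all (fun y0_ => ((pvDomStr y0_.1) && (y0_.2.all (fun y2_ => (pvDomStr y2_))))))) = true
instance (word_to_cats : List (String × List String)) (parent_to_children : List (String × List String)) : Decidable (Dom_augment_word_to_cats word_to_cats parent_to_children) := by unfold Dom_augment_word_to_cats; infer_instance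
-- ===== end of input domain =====

-- B replaces A's global fixed-point sweeps over all nodes by one explicit-stack graph
-- traversal per node (each node's ancestor set is collected once, with a visited set);
-- objective: alternative algorithm. Python sets are unordered, so both ports emit every
-- result set in sorted order (an order-independent way to consume a set).

-- ===== PORT A =====
-- build_child_to_ancestors, first loop: defaultdict(set); child_to_ancestors[child].add(parent)
def augA_build (parent_to_children : List (String × List String)) : PySem.Dict String (List String) :=
  parent_to_children.foldl
    (fun d pk => pk.2.foldl (fun d child => PySem.Dict.modify d child [] (fun s => PySem.Set.add s pk.1)) d)
    PySem.Dict.empty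

-- One body of A's `while changed` sweep, per snapshot item (child, ancestors):
-- expanded = set(ancestors) (a copy of a set value), the |= unions read the live
-- (already-updated) dict, and `expanded != ancestors` (set inequality) flags the change.
def augA_step (acc : PySem.Dict String (List String) × Bool) (ca : String × List String) :
    PySem.Dict String (List String) × Bool :=
  let e := ca.2.foldl (fun e a => PySem.Set.union e (PySem.Dict.getD acc.1 a [])) ca.2
  if PySem.Set.equal e ca.2 = false then (acc.1.insert ca.1 e, true) else acc

-- `for child, ancestors in list(child_to_ancestors.items()):` over the sweep-start snapshot
def augA_sweep (d : PySem.Dict String (List String)) : PySem.Dict String (List String) × Bool :=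
  d.items.foldl augA_step (d, false)

-- `while changed:` ported with fuel; the fuel passed below (|items|·|parents|+2) exceeds
-- the number of sweeps Python can make: every sweep but the last strictly grows some set,
-- and each per-child set only ever holds keys of parent_to_children.
def augA_loop : Nat → PySem.Dict String (List String) → PySem.Dict String (List String)
  | 0, d => d
  | n + 1, d =>
    let s := augA_sweep d
    if s.2 then augA_loop n s.1 else s.1

def augment_word_to_cats (word_to_cats : List (String × List String)) (parent_to_children : List (String × List String)) : List (String × List String) :=
  let c2a := augA_build parent_to_children
  let res := augA_loop (c2a.items.length * parent_to_children.length + 2) c2a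
  (word_to_cats.foldl (fun aug wc =>
      PySem.Dict.insert aug wc.1
        (PySem.List.sorted
          (wc.2.foldl (fun e cat => PySem.Set.union e (PySem.Dict.getD res cat [])) (PySem.Set.ofList wc.2))
          (fun x => x) false))
    PySem.Dict.empty).items

-- ===== PORT B =====
-- `parents.setdefault(child, set()).add(parent)` — the same inversion loop as A's seed
def augB_build (parent_to_children : List (String × List String)) : PySem.Dict String (List String) :=
  parent_to_children.foldl
    (fun d pk => pk.2.foldl (fun d child => PySem.Dict.modify d child [] (fun s => PySem.Set.add s pk.1)) d)
    PySem.Dict.empty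

-- `while stack: p = stack.pop(); if p not in seen: seen.add(p); stack.extend(parents.get(p, ()))`
-- (stack modelled top-first: pop = head, extend = prepend the pushed list reversed);
-- ported with fuel; the fuel passed below exceeds the number of iterations possible.
def augB_dfs (dp : PySem.Dict String (List String)) : Nat → List String → PySem.Set String → PySem.Set String
  | 0, _, seen => seen
  | _ + 1, [], seen => seen
  | n + 1, p :: rest, seen =>
    if PySem.Set.contains seen p then augB_dfs dp n rest seen
    else augB_dfs dp n ((PySem.Dict.getD dp p []).reverse ++ rest) (PySem.Set.add seen p)

-- `for node, direct in parents.items(): … ancestors[node] = seen`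
def augB_anc (dp : PySem.Dict String (List String)) : PySem.Dict String (List String) :=
  dp.items.foldl
    (fun a nd =>
      a.insert nd.1
        (augB_dfs dp
          (nd.2.length + dp.values.flatten.length * (dp.values.flatten.length + 1) + 1)
          nd.2 PySem.Set.empty))
    PySem.Dict.empty

def augment_word_to_cats_alt (word_to_cats : List (String × List String)) (parent_to_children : List (String × List String)) : List (String × List String) :=
  let dp := augB_build parent_to_children
  let anc := augB_anc dp
  (word_to_cats.foldl (fun out wc =>
      PySem.Dict.insert out wc.1
        (PySem.List.sorted
          (wc.2.foldl (fun e cat => PySem.Set.union e (PySem.Dict.getD anc cat [])) (PySem.Set.ofList wc.2))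
          (fun x => x) false))
    PySem.Dict.empty).items

-- ===== PRECONDITION & SPEC =====
def Spec_augment_word_to_cats (word_to_cats : List (String × List String)) (parent_to_children : List (String × List String)) (out : List (String × List String)) : Prop := out = augment_word_to_cats_alt word_to_cats parent_to_children
instance (word_to_cats : List (String × List String)) (parent_to_children : List (String × List String)) (out : List (String × List String)) : Decidable (Spec_augment_word_to_cats word_to_cats parent_to_children out) := by unfold Spec_augment_word_to_cats; infer_instance

-- ===== CLAIM (what is proved, stated in full; the proofs are below) =====
def Claim_equal_augment_word_to_cats : Prop := ∀ (word_to_cats : List (String × List String)) (parent_to_children : List (String × List String)), Dom_augment_word_to_cats word_to_cats parent_to_children → Spec_augment_word_to_cats word_to_cats parent_to_children (augment_word_to_cats word_to_cats parent_to_children)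

-- ===== LEMMAS AND PROOFS =====

-- the edge relation of the inverted hierarchy: x is a direct parent of c
def AugEdge (d0 : PySem.Dict String (List String)) (c x : String) : Prop :=
  x ∈ d0.getD c []

-- a Nodup list is no longer than any list containing it
lemma pv_nodup_length_le (l m : List String) (h : l.Nodup) (hs : l ⊆ m) : l.length ≤ m.length := by
  calc l.length = l.toFinset.card := (List.toFinset_card_of_nodup h).symm
    _ ≤ m.toFinset.card := Finset.card_le_card (fun x hx => by
        simp only [List.mem_toFinset] at *; exact hs hx)
    _ ≤ m.length := m.toFinset_card_le

-- a left fold of unions is one union with the concatenation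
lemma foldl_union_eq_union_flatMap (ls : List String) (f : String → List String) (s : List String) :
    ls.foldl (fun e a => PySem.Set.union e (f a)) s = PySem.Set.union s (ls.flatMap f) := by
  induction ls generalizing s with
  | nil => simp [PySem.Set.union, PySem.Set.update]
  | cons a rest ih =>
    simp only [List.foldl_cons, List.flatMap_cons]
    rw [ih]
    simp [PySem.Set.union, PySem.Set.update, List.foldl_append]

-- A's growth test (set inequality) coincides with strict length growth
lemma equal_union_eq_false_iff (s xs : List String) :
    (PySem.Set.equal (PySem.Set.union s xs) s = false) ↔ s.length < (PySem.Set.union s xs).length := by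
  have h := PySem.Set.update_eq_append_filter s xs
  rw [PySem.Set.union, h]
  rcases hx : (PySem.Set.ofList xs).filter (fun y => !(PySem.Set.contains s y)) with _ | ⟨y, ys⟩
  · simp [PySem.Set.equal_iff]
  · constructor
    · intro _; simp
    · intro _
      rw [Bool.eq_false_iff]
      intro hEq
      have hmem := (PySem.Set.equal_iff _ _).mp hEq y
      have hys : y ∈ s := hmem.mp (by simp)
      have hyf : y ∈ (PySem.Set.ofList xs).filter (fun y => !(PySem.Set.contains s y)) := by
        rw [hx]; simp
      have hc := List.of_mem_filter hyf
      simp only [Bool.not_eq_true'] at hc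
      have : PySem.Set.contains s y = true := (PySem.Set.contains_iff s y).mpr hys
      rw [hc] at this
      exact Bool.noConfusion this

-- any value looked up in a dict is one of its values' elements
lemma mem_flatten_values_of_mem_getD (d : PySem.Dict String (List String)) (p z : String)
    (h : z ∈ d.getD p []) : z ∈ d.values.flatten := by
  rw [PySem.Dict.getD_eq_get?_getD] at h
  rcases hg : d.get? p with _ | v
  · rw [hg] at h; simp at h
  · rw [hg] at h
    have hv : v ∈ d.values := by
      have := PySem.Dict.mem_items_of_get?_eq_some (d := d) hg
      simp only [PySem.Dict.values]
      exact List.mem_map.mpr ⟨(p, v), this, rfl⟩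
    exact List.mem_flatten.mpr ⟨v, hv, by simpa using h⟩

-- keys of the inverted hierarchy are distinct
lemma build_nodup_aux (p2c : List (String × List String)) :
    ∀ (d : PySem.Dict String (List String)), d.keys.Nodup →
    (p2c.foldl
      (fun d pk => pk.2.foldl (fun d child => PySem.Dict.modify d child [] (fun s => PySem.Set.add s pk.1)) d)
      d).keys.Nodup := by
  induction p2c with
  | nil => intro d h; exact h
  | cons pk rest ih =>
    intro d h
    simp only [List.foldl_cons]
    exact ih _ (PySem.Dict.nodup_keys_foldl_modify_key pk.2 (fun c => c) []
      (fun _ _ => (fun s => PySem.Set.add s pk.1)) d h)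

lemma build_nodup (p2c : List (String × List String)) : (augA_build p2c).keys.Nodup := by
  exact build_nodup_aux p2c PySem.Dict.empty (by simp [PySem.Dict.keys, PySem.Dict.empty])

-- properties of the inversion fold: values stay Nodup sets and keep any elementwise property
lemma inner_fold_values_nodup (par : String) (ch : List String) :
    ∀ (d : PySem.Dict String (List String)), (∀ k, (d.getD k []).Nodup) →
    ∀ k, ((ch.foldl (fun d child => PySem.Dict.modify d child [] (fun s => PySem.Set.add s par)) d).getD k []).Nodup := by
  induction ch with
  | nil => intro d h k; exact h k
  | cons c rest ih =>
    intro d h k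
    simp only [List.foldl_cons]
    refine ih _ (fun k' => ?_) k
    rw [PySem.Dict.getD_modify]
    split_ifs with hk
    · exact PySem.Set.nodup_add _ _ (h c)
    · exact h k'

lemma build_values_nodup (p2c : List (String × List String)) (k : String) :
    ((augA_build p2c).getD k []).Nodup := by
  unfold augA_build
  suffices h : ∀ (d : PySem.Dict String (List String)), (∀ k, (d.getD k []).Nodup) →
      ∀ k, ((p2c.foldl (fun d pk => pk.2.foldl (fun d child => PySem.Dict.modify d child [] (fun s => PySem.Set.add s pk.1)) d) d).getD k []).Nodup by
    exact h PySem.Dict.empty (fun k => by simp [PySem.Dict.getD_empty]) k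
  induction p2c with
  | nil => intro d h k; exact h k
  | cons pk rest ih =>
    intro d h k
    simp only [List.foldl_cons]
    exact ih _ (inner_fold_values_nodup pk.1 pk.2 d h) k

-- every element of any value of the inverted hierarchy is a parent key of the input
lemma inner_fold_values_prop (P : String → Prop) (par : String) (hpar : P par) (ch : List String) :
    ∀ (d : PySem.Dict String (List String)), (∀ k x, x ∈ d.getD k [] → P x) →
    ∀ k x, x ∈ (ch.foldl (fun d child => PySem.Dict.modify d child [] (fun s => PySem.Set.add s par)) d).getD k [] → P x := by
  induction ch with
  | nil => intro d h; exact h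
  | cons c rest ih =>
    intro d h
    simp only [List.foldl_cons]
    refine ih _ (fun k' x hx => ?_)
    rw [PySem.Dict.getD_modify] at hx
    split_ifs at hx with hk
    · rcases (PySem.Set.mem_add _ _ _).mp hx with hx | hx
      · exact h c x hx
      · exact hx ▸ hpar
    · exact h k' x hx

lemma build_values_prop (p2c : List (String × List String)) (P : String → Prop)
    (hp : ∀ pk ∈ p2c, P pk.1) (k x : String) (hx : x ∈ (augA_build p2c).getD k []) : P x := by
  unfold augA_build at hx
  revert hx
  suffices h : ∀ (l : List (String × List String)), (∀ pk ∈ l, P pk.1) →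
      ∀ (d : PySem.Dict String (List String)), (∀ k x, x ∈ d.getD k [] → P x) →
      ∀ k x, x ∈ (l.foldl (fun d pk => pk.2.foldl (fun d child => PySem.Dict.modify d child [] (fun s => PySem.Set.add s pk.1)) d) d).getD k [] → P x by
    intro hx
    exact h p2c hp PySem.Dict.empty (fun k x hx => by simp [PySem.Dict.getD_empty] at hx) k x hx
  intro l
  induction l with
  | nil => intro _ d h; exact h
  | cons pk rest ih =>
    intro hl d h
    simp only [List.foldl_cons]
    exact ih (fun q hq => hl q (List.mem_cons_of_mem _ hq)) _
      (inner_fold_values_prop P pk.1 (hl pk List.mem_cons_self) pk.2 d h)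

-- total size of a dict's values
def sumSizes (d : PySem.Dict String (List String)) : Nat :=
  (d.items.map (fun p => p.2.length)).sum

-- soundness of a closure dict with respect to the direct-parent dict b
def SoundB (b d : PySem.Dict String (List String)) : Prop :=
  ∀ c x, x ∈ d.getD c [] → Relation.TransGen (AugEdge b) c x

-- replacing the (unique) item at key k changes the size sum by the value-length difference
lemma sum_map_replace (k : String) (v v0 : List String) :
    ∀ (its : List (String × List String)), (its.map Prod.fst).Nodup → (k, v0) ∈ its →
    ((its.map (fun p => if p.1 == k then (k, v) else p)).map (fun p => p.2.length)).sum + v0.length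
      = (its.map (fun p => p.2.length)).sum + v.length := by
  intro its
  induction its with
  | nil => intro _ h; simp at h
  | cons p rest ih =>
    intro hnd hmem
    simp only [List.map_cons, List.nodup_cons] at hnd ⊢
    by_cases hk : p.1 = k
    · have hp : p = (k, v0) := by
        rcases List.mem_cons.mp hmem with h | h
        · exact h.symm
        · exfalso
          exact hnd.1 (hk ▸ List.mem_map.mpr ⟨(k, v0), h, rfl⟩ : p.1 ∈ rest.map Prod.fst)
      have hrest : rest.map (fun p => if p.1 == k then (k, v) else p) = rest := by
        have hmc : rest.map (fun p => if p.1 == k then (k, v) else p) = rest.map id := by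
          refine List.map_congr_left (fun q hq => ?_)
          have hqk : q.1 ≠ k := by
            intro hqk
            exact hnd.1 (by rw [hk, ← hqk]; exact List.mem_map.mpr ⟨q, hq, rfl⟩)
          simp only [beq_eq_false_iff_ne.mpr hqk, Bool.false_eq_true, if_false, id]
        simpa using hmc
      simp only [beq_self_eq_true, if_true, hrest, List.sum_cons, hp]
      omega
    · have hmem' : (k, v0) ∈ rest := by
        rcases List.mem_cons.mp hmem with h | h
        · exact absurd (congrArg Prod.fst h.symm) hk
        · exact h
      have : (p.1 == k) = false := by simp [hk]
      simp only [this, Bool.false_eq_true, if_false, List.sum_cons]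
      have := ih hnd.2 hmem'
      omega

lemma sumSizes_insert (d : PySem.Dict String (List String)) (k : String) (v v0 : List String)
    (hnd : d.keys.Nodup) (hmem : (k, v0) ∈ d.items) :
    sumSizes (d.insert k v) + v0.length = sumSizes d + v.length := by
  have hc : d.contains k = true :=
    (PySem.Dict.contains_iff_mem_keys _ _).mpr (PySem.Dict.mem_keys_of_mem_items _ hmem)
  unfold sumSizes
  rw [PySem.Dict.items_insert_of_contains _ _ hc]
  exact sum_map_replace k v v0 d.items hnd hmem

-- the changed flag is sticky through the sweep fold
lemma flag_sticky : ∀ (its : List (String × List String)) (acc : PySem.Dict String (List String)),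
    (its.foldl augA_step (acc, true)).2 = true := by
  intro its
  induction its with
  | nil => intro acc; rfl
  | cons ca rest ih =>
    intro acc
    simp only [List.foldl_cons, augA_step]
    split_ifs with h
    · exact ih _
    · exact ih _

-- the value stored at a contained key is an item
lemma mem_items_getD (d : PySem.Dict String (List String)) (k : String)
    (hk : k ∈ d.keys) : (k, d.getD k []) ∈ d.items := by
  have hc : d.contains k = true := (PySem.Dict.contains_iff_mem_keys _ _).mpr hk
  rcases hg : d.get? k with _ | v
  · rw [PySem.Dict.get?_eq_none_iff_contains] at hg
    rw [hg] at hc; exact Bool.noConfusion hc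
  · have := PySem.Dict.mem_items_of_get?_eq_some (d := d) hg
    rwa [PySem.Dict.getD_eq_get?_getD, hg]

-- one full sweep of A, analysed as a fold with a live accumulator
lemma sweep_fold (p2c : List (String × List String)) (b : PySem.Dict String (List String)) :
    ∀ (its : List (String × List String)) (acc : PySem.Dict String (List String)) (f0 : Bool),
    (its.map Prod.fst).Nodup →
    (∀ ca ∈ its, acc.getD ca.1 [] = ca.2) →
    acc.keys.Nodup →
    (∀ ca ∈ its, ca.1 ∈ acc.keys) →
    (∀ k, (acc.getD k []).Nodup) →
    (∀ k x, x ∈ acc.getD k [] → x ∈ p2c.map Prod.fst) →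
    SoundB b acc →
      ((its.foldl augA_step (acc, f0)).1.keys = acc.keys ∧
      (∀ k, ((its.foldl augA_step (acc, f0)).1.getD k []).Nodup) ∧
      (∀ k x, x ∈ (its.foldl augA_step (acc, f0)).1.getD k [] → x ∈ p2c.map Prod.fst) ∧
      SoundB b (its.foldl augA_step (acc, f0)).1 ∧
      (∀ k x, x ∈ acc.getD k [] → x ∈ (its.foldl augA_step (acc, f0)).1.getD k []) ∧
      sumSizes acc ≤ sumSizes (its.foldl augA_step (acc, f0)).1 ∧
      ((its.foldl augA_step (acc, f0)).2 = false → (its.foldl augA_step (acc, f0)).1 = acc ∧ f0 = false) ∧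
      (f0 = false → (its.foldl augA_step (acc, f0)).2 = true →
        sumSizes acc + 1 ≤ sumSizes (its.foldl augA_step (acc, f0)).1)) := by
  intro its
  induction its with
  | nil =>
    intro acc f0 _ _ _ _ hnv hsp hsound
    refine ⟨rfl, hnv, hsp, hsound, fun _ _ h => h, le_refl _, fun h => ⟨rfl, h⟩, ?_⟩
    intro h0 h1; rw [h0] at h1; exact Bool.noConfusion h1
  | cons ca rest ih =>
    intro acc f0 hnd hvals hk hmemk hnv hsp hsound
    simp only [List.map_cons, List.nodup_cons] at hnd
    have hval : acc.getD ca.1 [] = ca.2 := hvals ca List.mem_cons_self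
    have hck : ca.1 ∈ acc.keys := hmemk ca List.mem_cons_self
    have hcc : acc.contains ca.1 = true := (PySem.Dict.contains_iff_mem_keys _ _).mpr hck
    simp only [List.foldl_cons, augA_step]
    rw [foldl_union_eq_union_flatMap]
    set e := PySem.Set.union ca.2 (ca.2.flatMap (fun a => acc.getD a [])) with he
    have hmem_e : ∀ x, x ∈ e ↔ x ∈ ca.2 ∨ ∃ a ∈ ca.2, x ∈ acc.getD a [] := by
      intro x
      rw [he, PySem.Set.mem_union, List.mem_flatMap]
    by_cases hcond : PySem.Set.equal e ca.2 = false
    · -- write branch: acc' = acc.insert ca.1 e, flag true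
      simp only [hcond, if_true]
      set acc' := acc.insert ca.1 e with hacc'
      have hkeys' : acc'.keys = acc.keys := PySem.Dict.keys_insert_of_contains _ _ hcc
      have hgetD' : ∀ k, acc'.getD k [] = if k = ca.1 then e else acc.getD k [] := by
        intro k; rw [hacc', PySem.Dict.getD_insert]
      have he_nodup : e.Nodup := by
        rw [he, PySem.Set.union]
        exact PySem.Set.nodup_update _ _ (hval ▸ hnv ca.1)
      have he_sp : ∀ x, x ∈ e → x ∈ p2c.map Prod.fst := by
        intro x hx
        rcases (hmem_e x).mp hx with hx | ⟨a, _, hx⟩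
        · exact hsp ca.1 x (hval ▸ hx)
        · exact hsp a x hx
      have he_sound : ∀ x, x ∈ e → Relation.TransGen (AugEdge b) ca.1 x := by
        intro x hx
        rcases (hmem_e x).mp hx with hx | ⟨a, ha, hx⟩
        · exact hsound ca.1 x (hval ▸ hx)
        · exact Relation.TransGen.trans (hsound ca.1 a (hval ▸ ha)) (hsound a x hx)
      have hgrow' : ∀ k x, x ∈ acc.getD k [] → x ∈ acc'.getD k [] := by
        intro k x hx
        rw [hgetD']
        split_ifs with hkk
        · subst hkk; exact (hmem_e x).mpr (Or.inl (hval ▸ hx))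
        · exact hx
      have hlen : ca.2.length < e.length := by
        rw [he] at hcond ⊢
        exact (equal_union_eq_false_iff _ _).mp hcond
      have hsum : sumSizes acc' + ca.2.length = sumSizes acc + e.length :=
        sumSizes_insert acc ca.1 e ca.2 hk (hval ▸ mem_items_getD acc ca.1 hck)
      have hsum' : sumSizes acc + 1 ≤ sumSizes acc' := by omega
      -- hypotheses for the tail fold from acc'
      have ihh := ih acc' true hnd.2
        (fun q hq => by
          rw [hgetD', if_neg (fun hqk : q.1 = ca.1 => hnd.1 (by rw [← hqk]; exact List.mem_map.mpr ⟨q, hq, rfl⟩))]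
          exact hvals q (List.mem_cons_of_mem _ hq))
        (hkeys' ▸ hk)
        (fun q hq => hkeys' ▸ hmemk q (List.mem_cons_of_mem _ hq))
        (fun k => by rw [hgetD']; split_ifs with hkk; exacts [he_nodup, hnv k])
        (fun k x hx => by
          rw [hgetD'] at hx; split_ifs at hx with hkk
          exacts [he_sp x hx, hsp k x hx])
        (fun c x hx => by
          rw [hgetD'] at hx; split_ifs at hx with hkk
          exacts [hkk ▸ he_sound x hx, hsound c x hx])
      obtain ⟨i1, i2, i3, i4, i5, i6, _, _⟩ := ihh
      have hfin : (rest.foldl augA_step (acc', true)).2 = true := flag_sticky rest acc'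
      refine ⟨by rw [i1, hkeys'], i2, i3, i4,
        (fun k x hx => i5 k x (hgrow' k x hx)), by omega, ?_, ?_⟩
      · intro hf; rw [hfin] at hf; exact Bool.noConfusion hf
      · intro _ _; omega
    · -- no-write branch: state unchanged
      simp only [hcond]
      exact ih acc f0 hnd.2 (fun q hq => hvals q (List.mem_cons_of_mem _ hq)) hk
        (fun q hq => hmemk q (List.mem_cons_of_mem _ hq)) hnv hsp hsound

-- a sweep that reports no change did nothing, and certifies per-item closedness
lemma sweep_unchanged : ∀ (its : List (String × List String)) (acc : PySem.Dict String (List String)),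
    (its.foldl augA_step (acc, false)).2 = false →
    (its.foldl augA_step (acc, false) = (acc, false) ∧
      ∀ ca ∈ its, ∀ x, (x ∈ ca.2 ∨ ∃ a ∈ ca.2, x ∈ acc.getD a []) → x ∈ ca.2) := by
  intro its
  induction its with
  | nil => intro acc _; exact ⟨rfl, fun ca h => absurd h (List.not_mem_nil)⟩
  | cons ca rest ih =>
    intro acc hflag
    simp only [List.foldl_cons, augA_step] at hflag ⊢
    rw [foldl_union_eq_union_flatMap] at hflag ⊢
    by_cases hcond : PySem.Set.equal (PySem.Set.union ca.2 (ca.2.flatMap (fun a => acc.getD a []))) ca.2 = false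
    · exfalso
      simp only [hcond, if_true] at hflag
      rw [flag_sticky rest _] at hflag
      exact Bool.noConfusion hflag
    · simp only [hcond] at hflag ⊢
      have heq : PySem.Set.equal (PySem.Set.union ca.2 (ca.2.flatMap (fun a => acc.getD a []))) ca.2 = true := by
        cases h : PySem.Set.equal (PySem.Set.union ca.2 (ca.2.flatMap (fun a => acc.getD a []))) ca.2
        · exact absurd h hcond
        · rfl

      obtain ⟨h1, h2⟩ := ih acc hflag
      refine ⟨h1, fun q hq x hx => ?_⟩
      rcases List.mem_cons.mp hq with hq | hq
      · subst hq
        have := (PySem.Set.equal_iff _ _).mp heq x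
        exact this.mp ((PySem.Set.mem_union _ _ _).mpr (by
          rcases hx with hx | ⟨a, ha, hax⟩
          · exact Or.inl hx
          · exact Or.inr (List.mem_flatMap.mpr ⟨a, ha, hax⟩)))
      · exact h2 q hq x hx

-- total value size is bounded by (number of items) × (number of parents)
lemma sumSizes_le (p2c : List (String × List String)) (d : PySem.Dict String (List String))
    (hk : d.keys.Nodup)
    (hnv : ∀ k, (d.getD k []).Nodup)
    (hsp : ∀ k x, x ∈ d.getD k [] → x ∈ p2c.map Prod.fst) :
    sumSizes d ≤ d.items.length * p2c.length := by
  unfold sumSizes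
  have hbound : ∀ m ∈ d.items.map (fun p => p.2.length), m ≤ p2c.length := by
    intro m hm
    rcases List.mem_map.mp hm with ⟨p, hp, rfl⟩
    have hval : d.getD p.1 [] = p.2 :=
      PySem.Dict.getD_of_mem_items d (show (p.1, p.2) ∈ d.items from hp) hk []
    have : p.2.length ≤ (p2c.map Prod.fst).length :=
      pv_nodup_length_le _ _ (hval ▸ hnv p.1) (fun x hx => hsp p.1 x (hval ▸ hx))
    simpa using this
  calc (d.items.map (fun p => p.2.length)).sum
      ≤ (d.items.map (fun p => p.2.length)).length * p2c.length := by
        simpa [smul_eq_mul] using List.sum_le_card_nsmul _ _ hbound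
    _ = d.items.length * p2c.length := by simp

-- the fuelled while-loop reaches a true fixpoint of the sweep
lemma loop_fix (p2c : List (String × List String)) (b : PySem.Dict String (List String)) :
    ∀ (n : Nat) (d : PySem.Dict String (List String)),
    d.keys.Nodup →
    (∀ k, (d.getD k []).Nodup) →
    (∀ k x, x ∈ d.getD k [] → x ∈ p2c.map Prod.fst) →
    SoundB b d →
    d.items.length * p2c.length + 1 ≤ n + sumSizes d →
      ((augA_loop n d).keys = d.keys ∧
       SoundB b (augA_loop n d) ∧
       (∀ k x, x ∈ d.getD k [] → x ∈ (augA_loop n d).getD k []) ∧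
       augA_sweep (augA_loop n d) = (augA_loop n d, false)) := by
  intro n
  induction n with
  | zero =>
    intro d hk hnv hsp _ hfuel
    exact absurd (sumSizes_le p2c d hk hnv hsp) (by omega)
  | succ n ih =>
    intro d hk hnv hsp hsound hfuel
    have hkeys_items : d.items.map Prod.fst = d.keys := by simp [PySem.Dict.keys]
    have hsw := sweep_fold p2c b d.items d false (hkeys_items ▸ hk)
      (fun ca hca => PySem.Dict.getD_of_mem_items d (show (ca.1, ca.2) ∈ d.items from hca) hk [])
      hk
      (fun ca hca => PySem.Dict.mem_keys_of_mem_items _ hca)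
      hnv hsp hsound
    obtain ⟨c1, c2, c3, c4, c5, c6, c7, c8⟩ := hsw
    have hc1 : (augA_sweep d).1.keys = d.keys := c1
    have hloop : augA_loop (n + 1) d =
        if (augA_sweep d).2 then augA_loop n (augA_sweep d).1 else (augA_sweep d).1 := rfl
    by_cases hflag : (augA_sweep d).2 = true
    · -- a change happened: recurse with strictly larger total size
      rw [hloop, if_pos hflag]
      have hitems_len : (augA_sweep d).1.items.length = d.items.length := by
        have h1 : (augA_sweep d).1.keys.length = d.keys.length := by rw [hc1]
        simpa [PySem.Dict.keys] using h1
      have hsum : sumSizes d + 1 ≤ sumSizes (augA_sweep d).1 := c8 rfl hflag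
      have ihh := ih (augA_sweep d).1
        (by rw [hc1]; exact hk) c2 c3 c4
        (by rw [hitems_len]; omega)
      obtain ⟨j1, j2, j3, j4⟩ := ihh
      exact ⟨by rw [j1, hc1], j2, (fun k x hx => j3 k x (c5 k x hx)), j4⟩
    · -- no change: the sweep returned the dict unchanged, a fixpoint
      have hflag' : (augA_sweep d).2 = false := by
        cases h : (augA_sweep d).2
        · rfl
        · exact absurd h hflag
      rw [hloop, if_neg (by rw [hflag']; exact Bool.false_ne_true)]
      have hfix : (augA_sweep d).1 = d := (c7 hflag').1
      rw [hfix]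
      refine ⟨rfl, hsound, fun _ _ h => h, ?_⟩
      have hpair : augA_sweep d = ((augA_sweep d).1, (augA_sweep d).2) := rfl
      rw [hpair, hfix, hflag']

-- the A-side fixpoint computes exactly the transitive ancestors
lemma A_result_iff (p2c : List (String × List String)) (c x : String) :
    x ∈ (augA_loop ((augA_build p2c).items.length * p2c.length + 2) (augA_build p2c)).getD c [] ↔
      Relation.TransGen (AugEdge (augA_build p2c)) c x := by
  set d0 := augA_build p2c with hd0
  have hk : d0.keys.Nodup := build_nodup p2c
  have hnv : ∀ k, (d0.getD k []).Nodup := build_values_nodup p2c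
  have hsp : ∀ k x, x ∈ d0.getD k [] → x ∈ p2c.map Prod.fst := by
    intro k x hx
    exact build_values_prop p2c (fun y => y ∈ p2c.map Prod.fst)
      (fun pk hpk => List.mem_map.mpr ⟨pk, hpk, rfl⟩) k x hx
  have hsound0 : SoundB d0 d0 := fun c x hx => Relation.TransGen.single hx
  have hlf := loop_fix p2c d0 (d0.items.length * p2c.length + 2) d0 hk hnv hsp hsound0 (by omega)
  obtain ⟨f1, f2, f3, f4⟩ := hlf
  set r := augA_loop (d0.items.length * p2c.length + 2) d0 with hr
  constructor
  · exact fun hx => f2 c x hx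
  · intro htg
    have hflag : (r.items.foldl augA_step (r, false)).2 = false := by
      have : r.items.foldl augA_step (r, false) = augA_sweep r := rfl
      rw [this, f4]
    obtain ⟨_, hclosed⟩ := sweep_unchanged r.items r hflag
    induction htg with
    | single h => exact f3 c _ h
    | tail htg hE ih =>
      rename_i y z
      have hy : y ∈ r.getD c [] := ih
      have hcmem : c ∈ r.keys := by
        by_cases hcont : r.contains c = true
        · exact (PySem.Dict.contains_iff_mem_keys _ _).mp hcont
        · exfalso
          have hnil : r.getD c [] = [] := PySem.Dict.getD_of_not_contains r []
            (Bool.eq_false_iff.mpr hcont)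
          rw [hnil] at hy; exact absurd hy (List.not_mem_nil)
      have hitem : (c, r.getD c []) ∈ r.items := mem_items_getD r c hcmem
      exact hclosed (c, r.getD c []) hitem z (Or.inr ⟨y, hy, f3 y z hE⟩)

-- a value looked up in a dict is no longer than the concatenation of all values
lemma getD_length_le_flatten (dp : PySem.Dict String (List String)) (p : String) :
    (dp.getD p []).length ≤ dp.values.flatten.length := by
  rcases hg : dp.get? p with _ | v
  · rw [PySem.Dict.getD_eq_get?_getD, hg]; simp
  · rw [PySem.Dict.getD_eq_get?_getD, hg]
    have hv : v ∈ dp.values := by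
      have := PySem.Dict.mem_items_of_get?_eq_some (d := dp) hg
      simp only [PySem.Dict.values]
      exact List.mem_map.mpr ⟨(p, v), this, rfl⟩
    simpa using (List.sublist_flatten_of_mem hv).length_le

-- correctness of the explicit-stack traversal: with enough fuel it returns a Nodup set
-- containing seen and the stack, sound for reachability and closed under direct parents
lemma dfs_spec (dp : PySem.Dict String (List String)) :
    ∀ (n : Nat) (stack : List String) (seen : PySem.Set String),
    seen.Nodup →
    (∀ x ∈ seen, x ∈ dp.values.flatten) →
    (∀ x ∈ stack, x ∈ dp.values.flatten) →
    (∀ y ∈ seen, ∀ z ∈ dp.getD y [], z ∈ seen ∨ z ∈ stack) →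
    stack.length + (dp.values.flatten.length - seen.length) * (dp.values.flatten.length + 1) < n →
      ((augB_dfs dp n stack seen).Nodup ∧
       (∀ x ∈ seen, x ∈ augB_dfs dp n stack seen) ∧
       (∀ x ∈ stack, x ∈ augB_dfs dp n stack seen) ∧
       (∀ x ∈ augB_dfs dp n stack seen,
         x ∈ seen ∨ x ∈ stack ∨ ∃ s ∈ stack, Relation.TransGen (AugEdge dp) s x) ∧
       (∀ y ∈ augB_dfs dp n stack seen, ∀ z ∈ dp.getD y [], z ∈ augB_dfs dp n stack seen)) := by
  intro n
  induction n with
  | zero => intro stack seen _ _ _ _ hfuel; omega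
  | succ n ih =>
    intro stack seen hnd hsu hstu hcl hfuel
    match stack with
    | [] =>
      refine ⟨hnd, fun x hx => hx, fun x hx => absurd hx (List.not_mem_nil), 
        fun x hx => Or.inl hx, fun y hy z hz => ?_⟩
      rcases hcl y hy z hz with h | h
      · exact h
      · exact absurd h (List.not_mem_nil)
    | p :: rest =>
      show _ -- unfold one step
      by_cases hp : PySem.Set.contains seen p = true
      · have hpm : p ∈ seen := (PySem.Set.contains_iff _ _).mp hp
        have hred : augB_dfs dp (n+1) (p :: rest) seen = augB_dfs dp n rest seen := by
          simp only [augB_dfs, hp, if_true]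
        rw [hred]
        have ihh := ih rest seen hnd hsu (fun x hx => hstu x (List.mem_cons_of_mem _ hx))
          (fun y hy z hz => by
            rcases hcl y hy z hz with h | h
            · exact Or.inl h
            · rcases List.mem_cons.mp h with h | h
              · exact Or.inl (h ▸ hpm)
              · exact Or.inr h)
          (by simp only [List.length_cons] at hfuel; omega)
        obtain ⟨j1, j2, j3, j4, j5⟩ := ihh
        refine ⟨j1, j2, fun x hx => ?_, fun x hx => ?_, j5⟩
        · rcases List.mem_cons.mp hx with h | h
          · exact h ▸ j2 p hpm
          · exact j3 x h
        · rcases j4 x hx with h | h | ⟨s, hs, hts⟩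
          · exact Or.inl h
          · exact Or.inr (Or.inl (List.mem_cons_of_mem _ h))
          · exact Or.inr (Or.inr ⟨s, List.mem_cons_of_mem _ hs, hts⟩)
      · have hpm : p ∉ seen := fun h => hp ((PySem.Set.contains_iff _ _).mpr h)
        have hred : augB_dfs dp (n+1) (p :: rest) seen
            = augB_dfs dp n ((dp.getD p []).reverse ++ rest) (PySem.Set.add seen p) := by
          simp only [augB_dfs, hp, Bool.false_eq_true, if_false]
        rw [hred]
        have hadd : PySem.Set.add seen p = seen ++ [p] := PySem.Set.add_of_not_mem hpm
        have hndd : (PySem.Set.add seen p).Nodup := PySem.Set.nodup_add _ _ hnd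
        have hpu : p ∈ dp.values.flatten := hstu p List.mem_cons_self
        have hlen_seen : (PySem.Set.add seen p).length ≤ dp.values.flatten.length :=
          pv_nodup_length_le _ _ hndd (fun x hx => by
            rcases (PySem.Set.mem_add _ _ _).mp hx with h | h
            · exact hsu x h
            · exact h ▸ hpu)
        have hlen_add : (PySem.Set.add seen p).length = seen.length + 1 := by
          rw [hadd]; simp
        have hval_le : (dp.getD p []).length ≤ dp.values.flatten.length :=
          getD_length_le_flatten dp p
        have ihh := ih ((dp.getD p []).reverse ++ rest) (PySem.Set.add seen p) hndd
          (fun x hx => by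
            rcases (PySem.Set.mem_add _ _ _).mp hx with h | h
            · exact hsu x h
            · exact h ▸ hpu)
          (fun x hx => by
            rcases List.mem_append.mp hx with h | h
            · exact mem_flatten_values_of_mem_getD dp p x (List.mem_reverse.mp h)
            · exact hstu x (List.mem_cons_of_mem _ h))
          (fun y hy z hz => by
            rcases (PySem.Set.mem_add _ _ _).mp hy with h | h
            · rcases hcl y h z hz with h2 | h2
              · exact Or.inl ((PySem.Set.mem_add _ _ _).mpr (Or.inl h2))
              · rcases List.mem_cons.mp h2 with h2 | h2
                · exact Or.inl ((PySem.Set.mem_add _ _ _).mpr (Or.inr h2))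
                · exact Or.inr (List.mem_append.mpr (Or.inr h2))
            · subst h
              exact Or.inr (List.mem_append.mpr (Or.inl (List.mem_reverse.mpr hz))))
          (by
            have hFs : seen.length + 1 ≤ dp.values.flatten.length := hlen_add ▸ hlen_seen
            have hexp : (dp.values.flatten.length - seen.length) * (dp.values.flatten.length + 1)
                = (dp.values.flatten.length - (seen.length + 1)) * (dp.values.flatten.length + 1)
                  + (dp.values.flatten.length + 1) := by
              have h1 : dp.values.flatten.length - seen.length
                  = (dp.values.flatten.length - (seen.length + 1)) + 1 := by omega
              rw [h1]; ring
            simp only [List.length_append, List.length_reverse, List.length_cons] at hfuel ⊢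
            rw [hlen_add]
            omega)
        obtain ⟨j1, j2, j3, j4, j5⟩ := ihh
        have hseen_sub : ∀ x ∈ seen, x ∈ augB_dfs dp n ((dp.getD p []).reverse ++ rest) (PySem.Set.add seen p) :=
          fun x hx => j2 x ((PySem.Set.mem_add _ _ _).mpr (Or.inl hx))
        have hpin : p ∈ augB_dfs dp n ((dp.getD p []).reverse ++ rest) (PySem.Set.add seen p) :=
          j2 p ((PySem.Set.mem_add _ _ _).mpr (Or.inr rfl))
        refine ⟨j1, hseen_sub, fun x hx => ?_, fun x hx => ?_, j5⟩
        · rcases List.mem_cons.mp hx with h | h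
          · exact h ▸ hpin
          · exact j3 x (List.mem_append.mpr (Or.inr h))
        · rcases j4 x hx with h | h | ⟨s, hs, hts⟩
          · rcases (PySem.Set.mem_add _ _ _).mp h with h | h
            · exact Or.inl h
            · exact Or.inr (Or.inl (h ▸ List.mem_cons_self))
          · rcases List.mem_append.mp h with h | h
            · exact Or.inr (Or.inr ⟨p, List.mem_cons_self,
                Relation.TransGen.single (List.mem_reverse.mp h)⟩)
            · exact Or.inr (Or.inl (List.mem_cons_of_mem _ h))
          · rcases List.mem_append.mp hs with h | h
            · exact Or.inr (Or.inr ⟨p, List.mem_cons_self,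
                Relation.TransGen.trans (Relation.TransGen.single (List.mem_reverse.mp h)) hts⟩)
            · exact Or.inr (Or.inr ⟨s, List.mem_cons_of_mem _ h, hts⟩)

-- the per-node traversal results, collected into the ancestors dict, compute
-- exactly the transitive ancestors
lemma anc_getD_iff (p2c : List (String × List String)) (c x : String) :
    x ∈ (augB_anc (augB_build p2c)).getD c [] ↔
      Relation.TransGen (AugEdge (augB_build p2c)) c x := by
  have hAB : augB_build p2c = augA_build p2c := rfl
  set dp := augB_build p2c with hdp
  have hk : dp.keys.Nodup := hAB ▸ build_nodup p2c
  have hkeys_items : dp.items.map Prod.fst = dp.keys := by simp [PySem.Dict.keys]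
  have hitems : (augB_anc dp).items = dp.items.map (fun nd =>
      (nd.1, augB_dfs dp (nd.2.length + dp.values.flatten.length * (dp.values.flatten.length + 1) + 1)
        nd.2 PySem.Set.empty)) := by
    unfold augB_anc
    rw [PySem.Dict.items_foldl_insert_fresh dp.items Prod.fst _ PySem.Dict.empty
      (fun a _ => PySem.Dict.contains_empty _) (hkeys_items ▸ hk)]
    rfl
  have hanc_keys : (augB_anc dp).keys = dp.keys := by
    simp only [PySem.Dict.keys, hitems, List.map_map]
    rfl
  have hanc_nodup : (augB_anc dp).keys.Nodup := by rw [hanc_keys]; exact hk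
  by_cases hcont : dp.contains c = true
  · -- c is a key: its dict value is the traversal from its direct parents
    have hcmem : c ∈ dp.keys := (PySem.Dict.contains_iff_mem_keys _ _).mp hcont
    have hitem : (c, dp.getD c []) ∈ dp.items := mem_items_getD dp c hcmem
    have hmapped : (c, augB_dfs dp ((dp.getD c []).length + dp.values.flatten.length * (dp.values.flatten.length + 1) + 1)
        (dp.getD c []) PySem.Set.empty) ∈ (augB_anc dp).items := by
      rw [hitems]
      exact List.mem_map.mpr ⟨(c, dp.getD c []), hitem, rfl⟩
    have hval : (augB_anc dp).getD c []
        = augB_dfs dp ((dp.getD c []).length + dp.values.flatten.length * (dp.values.flatten.length + 1) + 1)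
            (dp.getD c []) PySem.Set.empty :=
      PySem.Dict.getD_of_mem_items _ hmapped hanc_nodup []
    have hds := dfs_spec dp ((dp.getD c []).length + dp.values.flatten.length * (dp.values.flatten.length + 1) + 1)
      (dp.getD c []) PySem.Set.empty
      (by simp [PySem.Set.empty])
      (by intro x hx; simp [PySem.Set.empty] at hx)
      (fun x hx => mem_flatten_values_of_mem_getD dp c x hx)
      (by intro y hy; simp [PySem.Set.empty] at hy)
      (by simp only [PySem.Set.empty, List.length_nil, Nat.sub_zero]; omega)
    obtain ⟨j1, _, j3, j4, j5⟩ := hds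
    rw [hval]
    set S := augB_dfs dp ((dp.getD c []).length + dp.values.flatten.length * (dp.values.flatten.length + 1) + 1)
      (dp.getD c []) PySem.Set.empty with hS
    have hTGin : ∀ u v, Relation.TransGen (AugEdge dp) u v → u ∈ S → v ∈ S := by
      intro u v h
      induction h with
      | single hE => exact fun hu => j5 _ hu _ hE
      | tail _ hE ih => exact fun hu => j5 _ (ih hu) _ hE
    constructor
    · intro hx
      rcases j4 x hx with h | h | ⟨s, hs, hts⟩
      · simp [PySem.Set.empty] at h
      · exact Relation.TransGen.single h
      · exact Relation.TransGen.trans (Relation.TransGen.single hs) hts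
    · intro htg
      rcases Relation.TransGen.head'_iff.mp htg with ⟨b, hEb, hrt⟩
      have hbS : b ∈ S := j3 b hEb
      rcases Relation.reflTransGen_iff_eq_or_transGen.mp hrt with h | h
      · exact h ▸ hbS
      · exact hTGin b x h hbS
  · -- c is not a key: no direct parents, hence no ancestors
    have hanc_cont : (augB_anc dp).contains c = false := by
      cases h : (augB_anc dp).contains c
      · rfl
      · exfalso
        have := (PySem.Dict.contains_iff_mem_keys _ _).mp h
        rw [hanc_keys] at this
        rw [(PySem.Dict.contains_iff_mem_keys _ _).mpr this] at hcont
        exact hcont rfl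
    have hnil : (augB_anc dp).getD c [] = [] :=
      PySem.Dict.getD_of_not_contains _ [] hanc_cont
    have hdpnil : dp.getD c [] = [] :=
      PySem.Dict.getD_of_not_contains _ [] (Bool.eq_false_iff.mpr hcont)
    rw [hnil]
    simp only [List.not_mem_nil, false_iff]
    intro htg
    rcases Relation.TransGen.head'_iff.mp htg with ⟨b, hEb, _⟩
    unfold AugEdge at hEb
    rw [hdpnil] at hEb
    exact absurd hEb (List.not_mem_nil)

-- ===== VERDICT (by name: the statement is the Claim_ definition above) =====
-- per-word: A's fixpoint-based expansion and B's traversal-based expansion are the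
-- same set, hence the same sorted list
lemma value_eq (p2c : List (String × List String)) (cats : List String) :
    PySem.List.sorted
      (cats.foldl (fun e cat => PySem.Set.union e
        (PySem.Dict.getD (augA_loop ((augA_build p2c).items.length * p2c.length + 2) (augA_build p2c)) cat []))
        (PySem.Set.ofList cats)) (fun x => x) false
    = PySem.List.sorted
      (cats.foldl (fun e cat => PySem.Set.union e (PySem.Dict.getD (augB_anc (augB_build p2c)) cat []))
        (PySem.Set.ofList cats)) (fun x => x) false := by
  rw [foldl_union_eq_union_flatMap, foldl_union_eq_union_flatMap]
  apply PySem.List.sorted_eq_sorted_of_perm _ _ _ (fun a b h => h)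
  refine (List.perm_ext_iff_of_nodup
    (PySem.Set.nodup_union _ _ (PySem.Set.nodup_ofList _))
    (PySem.Set.nodup_union _ _ (PySem.Set.nodup_ofList _))).mpr ?_
  intro x
  rw [PySem.Set.mem_union, PySem.Set.mem_union, List.mem_flatMap, List.mem_flatMap]
  constructor
  · rintro (h | ⟨c, hc, hx⟩)
    · exact Or.inl h
    · exact Or.inr ⟨c, hc, (anc_getD_iff p2c c x).mpr ((A_result_iff p2c c x).mp hx)⟩
  · rintro (h | ⟨c, hc, hx⟩)
    · exact Or.inl h
    · exact Or.inr ⟨c, hc, (A_result_iff p2c c x).mpr ((anc_getD_iff p2c c x).mp hx)⟩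

theorem augment_word_to_cats_spec : Claim_equal_augment_word_to_cats := by
  intro word_to_cats parent_to_children _
  unfold Spec_augment_word_to_cats augment_word_to_cats augment_word_to_cats_alt
  simp only [value_eq parent_to_children]
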